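-- pv_equiv track=rewrite | github.com/konstter/Irdeto2022 | ex1/ex1_coding.py | solution
-- ===== SOURCE A (Python) =====
-- def solution(A):
--
--     def f(Ar, c):
--         s_set, c1 = [], 0
--         for n in Ar:
--             if n:
--                 if n & 1:
--                     c1 += 1
--                 s_set.append(n >> 1)
--         if c1 > c:
--             c = c1
--         if c < len(s_set):
--             return f(s_set, c)
--         else:
--             return c
--
--     return f(A, 0)
-- ===== SOURCE B (Python) =====
-- def solution(A):
--     if not A:
--         return 0
--     top = max(x.bit_length() for x in A)
--     return max(sum((x >> p) & 1 for x in A) for p in range(top + 1))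
-- ===== Notes on version B (the rewrite author's own statement) =====
-- stated objective: simpler
-- what changed: A recursively rebuilds a shrinking list of right-shifted survivors, rescanning it once per bit position; B makes no recursion and builds no lists: it takes the max over bit positions 0..max bit_length of the count of elements with that bit set, read off directly with (x >> p) & 1.
import Mathlib
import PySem

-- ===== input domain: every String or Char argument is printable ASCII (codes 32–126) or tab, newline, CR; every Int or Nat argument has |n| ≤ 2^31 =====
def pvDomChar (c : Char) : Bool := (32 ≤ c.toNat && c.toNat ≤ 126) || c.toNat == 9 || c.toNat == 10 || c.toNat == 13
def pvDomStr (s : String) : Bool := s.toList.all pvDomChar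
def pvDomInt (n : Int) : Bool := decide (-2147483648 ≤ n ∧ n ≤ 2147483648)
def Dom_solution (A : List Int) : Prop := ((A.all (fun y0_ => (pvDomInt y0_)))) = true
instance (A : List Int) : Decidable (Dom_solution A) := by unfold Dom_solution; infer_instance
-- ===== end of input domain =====

-- B replaces A's recursive shrink-and-rescan (rebuild the list of shifted survivors each round)
-- by one direct column scan: max over bit positions p ≤ max bit length of the count of elements
-- with bit p set.  Objective: simpler (no recursion, no list rebuilding); same asymptotic cost.

-- ===== PORT A =====
-- A's inner loop body: if n: (if n & 1: c1 += 1); s_set.append(n >> 1)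
def pvStep (acc : List Int × Int) (n : Int) : List Int × Int :=
  if n ≠ 0 then (acc.1 ++ [n >>> (1:Nat)], acc.2 + (if PySem.Int.band n 1 ≠ 0 then 1 else 0))
  else acc

def pvMu (L : List Int) : Nat := (L.map Int.natAbs).sum

-- literal port of A's inner recursion f(Ar, c).  The Nat argument is a fuel bound that only
-- makes the recursion structural: each recursive call strictly shrinks pvMu (theorem pvTerm),
-- so with fuel pvMu Ar + 1 the fuel-0 branch is never reached (proved in pvMain below).
def solutionF : Nat → List Int → Int → Int
  | 0, _, c => c
  | F + 1, Ar, c =>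
    let sc := Ar.foldl pvStep ([], 0)
    let c' := if sc.2 > c then sc.2 else c
    if c' < (sc.1.length : Int) then solutionF F sc.1 c' else c'

def solution (A : List Int) : Int := solutionF (pvMu A + 1) A 0

-- ===== PORT B =====
-- Source B: if not A: return 0
--       top = max(x.bit_length() for x in A)
--       return max(sum((x >> p) & 1 for x in A) for p in range(top + 1))
-- Python's max over these nonempty generators is ported as a foldl seeded with 0, which is
-- exact here because every bit_length and every column sum is ≥ 0.
def solution_alt (A : List Int) : Int :=
  if A = [] then 0
  else
    let top := A.foldl (fun (m : Nat) (x : Int) => max m (PySem.Int.bitLength x)) 0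
    (List.range (top + 1)).foldl
      (fun (m : Int) (p : Nat) =>
        max m (A.foldl (fun (s : Int) (x : Int) => s + PySem.Int.band (x >>> p) 1) 0)) 0

-- ===== PRECONDITION & SPEC =====
def Spec_solution (A : List Int) (out : Int) : Prop := out = solution_alt A
instance (A : List Int) (out : Int) : Decidable (Spec_solution A out) := by unfold Spec_solution; infer_instance

-- ===== CLAIM (what is proved, stated in full; the proofs are below) =====
def Claim_equal_solution : Prop := ∀ (A : List Int), Dom_solution A → Spec_solution A (solution A)

-- ===== LEMMAS AND PROOFS =====

-- the survivors list and the bit-0 count produced by one pass of A's loop (needed for termination)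
def pvShift (A : List Int) : List Int := (A.filter (fun n => n ≠ 0)).map (fun n : Int => n >>> (1:Nat))
def pvC1 (A : List Int) : Int :=
  ((A.filter (fun n => n ≠ 0)).map (fun n : Int => if PySem.Int.band n 1 ≠ 0 then (1:Int) else 0)).sum

theorem pvLoop_eq (A : List Int) : ∀ (s : List Int) (c : Int),
    A.foldl pvStep (s, c) = (s ++ pvShift A, c + pvC1 A) := by
  induction A with
  | nil => intro s c; simp [pvShift, pvC1]
  | cons n t ih =>
    intro s c
    by_cases h : n = 0 <;>
      simp [pvStep, pvShift, pvC1, h, ih] <;> ring_nf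

theorem pvNatAbs_shift_le (n : Int) : (n >>> (1:Nat)).natAbs ≤ n.natAbs := by
  have h : n >>> (1:Nat) = n / 2 := by
    rw [Int.shiftRight_eq_div_pow]; norm_num
  rw [h]; omega

theorem pvNatAbs_shift_lt (n : Int) (h2 : 2 ≤ n.natAbs) : (n >>> (1:Nat)).natAbs < n.natAbs := by
  have h : n >>> (1:Nat) = n / 2 := by
    rw [Int.shiftRight_eq_div_pow]; norm_num
  rw [h]; omega

theorem pvMu_shift_le (A : List Int) : pvMu (pvShift A) ≤ pvMu A := by
  induction A with
  | nil => simp [pvShift, pvMu]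
  | cons n t ih =>
    by_cases h : n = 0 <;> simp [pvShift, pvMu, h] at ih ⊢
    · omega
    · have := pvNatAbs_shift_le n; omega

theorem pvMu_shift_lt (A : List Int) (h : ∃ x ∈ A, 2 ≤ x.natAbs) :
    pvMu (pvShift A) < pvMu A := by
  induction A with
  | nil => simp at h
  | cons n t ih =>
    rcases h with ⟨x, hx, h2⟩
    rcases List.mem_cons.mp hx with rfl | hxt
    · have hn : ¬ (x = 0) := by omega
      have h3 := pvNatAbs_shift_lt x h2
      have h4 := pvMu_shift_le t
      simp [pvShift, pvMu, hn] at h4 ⊢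
      omega
    · by_cases hn : n = 0 <;>
        have h5 := ih ⟨x, hxt, h2⟩ <;>
        simp [pvShift, pvMu, hn] at h5 ⊢
      · omega
      · have := pvNatAbs_shift_le n; omega

theorem pvC1_eq_len (A : List Int) (hb : ∀ x ∈ A, x.natAbs ≤ 1) :
    pvC1 A = ((pvShift A).length : Int) := by
  induction A with
  | nil => simp [pvShift, pvC1]
  | cons n t ih =>
    have ht : ∀ x ∈ t, x.natAbs ≤ 1 := fun x hx => hb x (List.mem_cons_of_mem _ hx)
    by_cases h : n = 0 <;> simp [pvShift, pvC1, h] at ih ⊢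
    · exact ih ht
    · have h1 : n = 1 ∨ n = -1 := by have := hb n (by simp); omega
      have hb1 : PySem.Int.band n 1 = 1 := by rcases h1 with rfl | rfl <;> decide
      simp [hb1, ih ht]
      omega

theorem pvTerm (Ar : List Int) (c : Int)
    (h1 : pvC1 Ar ≤ c) (h2 : c < ((pvShift Ar).length : Int)) :
    pvMu (pvShift Ar) < pvMu Ar := by
  by_cases hex : ∃ x ∈ Ar, 2 ≤ x.natAbs
  · exact pvMu_shift_lt Ar hex
  · push_neg at hex
    have hsm : ∀ x ∈ Ar, x.natAbs ≤ 1 := fun x hx => by have := hex x hx; omega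
    have := pvC1_eq_len Ar hsm
    omega


theorem pvBand_one_cases (n : Int) : PySem.Int.band n 1 = 0 ∨ PySem.Int.band n 1 = 1 := by
  rw [PySem.Int.band_one]
  have h1 := PySem.Int.mod_nonneg n (b := 2) (by omega)
  have h2 := PySem.Int.mod_lt n (b := 2) (by omega)
  omega

-- bit p of x as Python computes it: (x >> p) & 1
def pvBit (p : Nat) (x : Int) : Int := PySem.Int.band (x >>> p) 1
-- column sum at bit position p
def pvCsum (p : Nat) (A : List Int) : Int := (A.map (pvBit p)).sum
-- max of the column sums over positions 0..P
def pvMcol : Nat → List Int → Int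
  | 0, A => pvCsum 0 A
  | P + 1, A => max (pvMcol P A) (pvCsum (P + 1) A)
-- every element is exhausted after P shifts
def pvBdd (P : Nat) (A : List Int) : Prop := ∀ x ∈ A, x >>> P = 0 ∨ x >>> P = -1

theorem pvBit_le_one (p : Nat) (x : Int) : pvBit p x ≤ 1 := by
  unfold pvBit; rcases pvBand_one_cases (x >>> p) with h | h <;> omega

theorem pvShiftRight_shiftRight (x : Int) (a b : Nat) : (x >>> a) >>> b = x >>> (a + b) := by
  simp only [Int.shiftRight_eq_div_pow]
  rw [Int.ediv_ediv_of_nonneg (by positivity)]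
  norm_cast
  rw [pow_add]

theorem pvBit_shift (p : Nat) (n : Int) : pvBit p (n >>> (1:Nat)) = pvBit (p + 1) n := by
  unfold pvBit
  rw [pvShiftRight_shiftRight, show 1 + p = p + 1 from Nat.add_comm 1 p]

theorem pvBit_zero (p : Nat) : pvBit p 0 = 0 := by
  unfold pvBit
  rw [Int.shiftRight_eq_div_pow, Int.zero_ediv]
  decide

theorem pvCsum_shift (p : Nat) (A : List Int) : pvCsum p (pvShift A) = pvCsum (p + 1) A := by
  induction A with
  | nil => simp [pvCsum, pvShift]
  | cons n t ih =>
    by_cases h : n = 0 <;> simp [pvCsum, pvShift, h] at ih ⊢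
    · rw [ih]; rw [show pvBit (p+1) 0 = 0 from pvBit_zero _]; omega
    · rw [ih, pvBit_shift]

theorem pvBit_stab (P : Nat) (x : Int) (h : x >>> P = 0 ∨ x >>> P = -1) :
    pvBit (P + 1) x = pvBit P x := by
  unfold pvBit
  rw [← pvShiftRight_shiftRight x P 1]
  rcases h with h | h <;> rw [h] <;> decide

theorem pvCsum_stab (P : Nat) (A : List Int) (h : pvBdd P A) :
    pvCsum (P + 1) A = pvCsum P A := by
  induction A with
  | nil => simp [pvCsum]
  | cons n t ih =>
    simp only [pvCsum, List.map_cons, List.sum_cons] at ih ⊢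
    rw [pvBit_stab P n (h n (by simp)), ih (fun x hx => h x (List.mem_cons_of_mem _ hx))]

theorem pvMcol_ge (P p : Nat) (A : List Int) (h : p ≤ P) : pvCsum p A ≤ pvMcol P A := by
  induction P with
  | zero =>
    have hp : p = 0 := Nat.le_zero.mp h
    subst hp; simp [pvMcol]
  | succ Q ih =>
    rcases Nat.lt_or_ge p (Q + 1) with hl | hl
    · exact le_trans (ih (by omega)) (le_max_left _ _)
    · have hp : p = Q + 1 := by omega
      subst hp; exact le_max_right _ _

theorem pvMcol_exists (P : Nat) (A : List Int) : ∃ p ≤ P, pvMcol P A = pvCsum p A := by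
  induction P with
  | zero => exact ⟨0, le_refl _, rfl⟩
  | succ Q ih =>
    rcases ih with ⟨p, hp, he⟩
    rcases max_cases (pvMcol Q A) (pvCsum (Q + 1) A) with ⟨hm, _⟩ | ⟨hm, _⟩
    · exact ⟨p, by omega, by show max _ _ = _; rw [hm, he]⟩
    · exact ⟨Q + 1, le_refl _, by show max _ _ = _; rw [hm]⟩

theorem pvBdd_shift (P : Nat) (A : List Int) (h : pvBdd P A) : pvBdd P (pvShift A) := by
  intro y hy
  simp only [pvShift, List.mem_map, List.mem_filter] at hy
  rcases hy with ⟨n, ⟨hn, _⟩, rfl⟩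
  rw [pvShiftRight_shiftRight, show 1 + P = P + 1 from Nat.add_comm 1 P, ← pvShiftRight_shiftRight]
  rcases h n hn with he | he <;> rw [he] <;> decide

theorem pvMcol_step (P : Nat) (A : List Int) (h : pvBdd P A) :
    max (pvCsum 0 A) (pvMcol P (pvShift A)) = pvMcol P A := by
  apply le_antisymm
  · apply max_le
    · exact pvMcol_ge P 0 A (by omega)
    · rcases pvMcol_exists P (pvShift A) with ⟨p, hp, he⟩
      rw [he, pvCsum_shift]
      rcases Nat.lt_or_ge p P with hl | hl
      · exact pvMcol_ge P (p + 1) A (by omega)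
      · have hp2 : p = P := by omega
        subst hp2
        rw [pvCsum_stab _ _ h]
        exact pvMcol_ge _ _ _ (le_refl _)
  · rcases pvMcol_exists P A with ⟨p, hp, he⟩
    rw [he]
    cases p with
    | zero => exact le_max_left _ _
    | succ q =>
      rw [← pvCsum_shift]
      exact le_trans (pvMcol_ge P q (pvShift A) (by omega)) (le_max_right _ _)

theorem pvSum_le_length (L : List Int) (f : Int → Int) (h : ∀ x ∈ L, f x ≤ 1) :
    (L.map f).sum ≤ (L.length : Int) := by
  induction L with
  | nil => simp
  | cons n t ih =>
    have hn1 := h n (by simp)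
    have h2 := ih (fun x hx => h x (List.mem_cons_of_mem _ hx))
    simp only [List.map_cons, List.sum_cons, List.length_cons]
    push_cast
    omega

theorem pvC1_csum (A : List Int) : pvC1 A = pvCsum 0 A := by
  induction A with
  | nil => simp [pvC1, pvCsum]
  | cons n t ih =>
    by_cases h : n = 0 <;> simp [pvC1, pvCsum, h] at ih ⊢
    · rw [ih, show pvBit 0 0 = 0 from pvBit_zero _]; omega
    · rw [ih]
      have hb : pvBit 0 n = PySem.Int.band n 1 := by
        unfold pvBit
        norm_num
      rcases pvBand_one_cases n with hc | hc <;> simp [hc, hb] <;> omega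

theorem pvReturn (P : Nat) (A : List Int) (c : Int) (_hb : pvBdd P A)
    (hrec : ¬ ((if pvC1 A > c then pvC1 A else c) < ((pvShift A).length : Int))) :
    (if pvC1 A > c then pvC1 A else c) = max c (pvMcol P A) := by
  have hc1 : pvC1 A = pvCsum 0 A := pvC1_csum A
  rcases pvMcol_exists P A with ⟨p, hp, he⟩
  have h0 : pvCsum 0 A ≤ pvMcol P A := pvMcol_ge P 0 A (by omega)
  have hup : pvMcol P A ≤ (if pvC1 A > c then pvC1 A else c) := by
    rw [he]
    cases p with
    | zero => rw [hc1]; split <;> omega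
    | succ q =>
      rw [← pvCsum_shift]
      have h1 : pvCsum q (pvShift A) ≤ ((pvShift A).length : Int) :=
        pvSum_le_length _ _ (fun x _ => pvBit_le_one q x)
      push_neg at hrec
      split <;> omega
  rw [hc1] at hup ⊢
  simp only [max_def] at hup ⊢
  split_ifs at hup ⊢ <;> omega

theorem pvMain : ∀ (F : Nat) (P : Nat) (A : List Int) (c : Int),
    pvMu A < F → pvBdd P A → solutionF F A c = max c (pvMcol P A) := by
  intro F
  induction F with
  | zero => intro P A c hmu hb; omega
  | succ M ih =>
    intro P A c hmu hb
    show (let sc := A.foldl pvStep ([], 0)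
          let c' := if sc.2 > c then sc.2 else c
          if c' < (sc.1.length : Int) then solutionF M sc.1 c' else c') = max c (pvMcol P A)
    simp only [pvLoop_eq, List.nil_append, zero_add]
    by_cases hrec : ((if pvC1 A > c then pvC1 A else c) < ((pvShift A).length : Int))
    · rw [if_pos hrec]
      have hlt : pvMu (pvShift A) < pvMu A := by
        rcases le_or_gt (pvC1 A) c with h1 | h1
        · exact pvTerm A c h1 (by split at hrec <;> omega)
        · exact pvTerm A (pvC1 A) (le_refl _) (by split at hrec <;> omega)
      rw [ih P (pvShift A) _ (by omega) (pvBdd_shift P A hb)]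
      rw [← pvMcol_step P A hb, pvC1_csum A]
      simp only [max_def]
      split_ifs <;> omega
    · rw [if_neg hrec]
      exact pvReturn P A c hb hrec

theorem pvBdd_of_bitLength (P : Nat) (x : Int) (h : PySem.Int.bitLength x ≤ P) :
    x >>> P = 0 ∨ x >>> P = -1 := by
  have habs : x.natAbs < 2 ^ P :=
    lt_of_lt_of_le (PySem.Int.lt_two_pow_bitLength x) (Nat.pow_le_pow_right (by omega) h)
  rcases le_or_gt 0 x with hx | hx
  · left
    rw [Int.shiftRight_eq_div_pow]
    apply Int.ediv_eq_zero_of_lt hx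
    exact_mod_cast (by omega : x < ((2 ^ P : Nat) : Int))
  · right
    rw [Int.shiftRight_eq_div_pow]
    have hp : (0:Int) < ((2 ^ P : Nat) : Int) := by positivity
    have h1 : x / ((2 ^ P : Nat) : Int) < 0 := Int.ediv_neg_of_neg_of_pos hx hp
    have h2 : (-((2 ^ P : Nat) : Int)) / ((2 ^ P : Nat) : Int) ≤ x / ((2 ^ P : Nat) : Int) := by
      apply Int.ediv_le_ediv hp
      omega
    rw [Int.neg_ediv_self _ (by omega)] at h2
    omega

theorem pvFoldlMax_init_le (f : Int → Nat) (A : List Int) : ∀ i : Nat,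
    i ≤ A.foldl (fun (m : Nat) (y : Int) => max m (f y)) i := by
  induction A with
  | nil => intro i; simp
  | cons n t ih =>
    intro i
    exact le_trans (le_max_left i (f n)) (ih _)

theorem pvFoldlMax_mem_le (f : Int → Nat) (A : List Int) (x : Int) (hx : x ∈ A) : ∀ i : Nat,
    f x ≤ A.foldl (fun (m : Nat) (y : Int) => max m (f y)) i := by
  induction A with
  | nil => simp at hx
  | cons n t ih =>
    intro i
    rcases List.mem_cons.mp hx with rfl | hxt
    · exact le_trans (le_max_right i (f x)) (pvFoldlMax_init_le f t _)
    · exact ih hxt _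

theorem pvInner_eq (A : List Int) (p : Nat) : ∀ c : Int,
    A.foldl (fun (s : Int) (x : Int) => s + PySem.Int.band (x >>> p) 1) c = c + pvCsum p A := by
  induction A with
  | nil => intro c; simp [pvCsum]
  | cons n t ih =>
    intro c
    simp only [List.foldl_cons, ih, pvCsum, List.map_cons, List.sum_cons]
    show c + pvBit p n + (t.map (pvBit p)).sum = c + (pvBit p n + (t.map (pvBit p)).sum)
    ring

theorem pvRangeFold (A : List Int) : ∀ (P : Nat) (i : Int),
    (List.range (P + 1)).foldl (fun (m : Int) (p : Nat) => max m (pvCsum p A)) i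
      = max i (pvMcol P A) := by
  intro P
  induction P with
  | zero => intro i; simp [pvMcol]
  | succ Q ih =>
    intro i
    rw [List.range_succ, List.foldl_append, ih]
    simp only [List.foldl_cons, List.foldl_nil]
    show max (max i (pvMcol Q A)) (pvCsum (Q + 1) A) = max i (max (pvMcol Q A) (pvCsum (Q + 1) A))
    rw [max_assoc]

-- ===== VERDICT (by name: the statement is the Claim_ definition above) =====
theorem solution_spec : Claim_equal_solution := by
  unfold Claim_equal_solution
  intro A _
  unfold Spec_solution solution solution_alt
  by_cases hA : A = []
  · subst hA
    rw [pvMain (pvMu [] + 1) 0 [] 0 (by omega) (by intro x hx; simp at hx)]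
    simp [pvMcol, pvCsum]
  · rw [if_neg hA]
    have hbdd : pvBdd (A.foldl (fun (m : Nat) (x : Int) => max m (PySem.Int.bitLength x)) 0) A := by
      intro x hx
      exact pvBdd_of_bitLength _ x (pvFoldlMax_mem_le _ A x hx 0)
    rw [pvMain (pvMu A + 1) _ A 0 (by omega) hbdd]
    simp only [pvInner_eq, zero_add]
    rw [pvRangeFold]
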